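-- pv_equiv track=rewrite | github.com/malicious/tracker | notes_v2/add.py | _special_tokenize
-- ===== SOURCE A (Python) =====
-- from typing import Dict, Optional, Set
--
-- def tokenize_domain_ids(encoded_domain_ids: str):
--     next_domain_id = ""
--     current_token_start = 0
--
--     while True:
--         next_ampersand_index = encoded_domain_ids.find('&', current_token_start)
--
--         # no more ampersands, return the rest of the string
--         if next_ampersand_index == -1:
--             next_domain_id += encoded_domain_ids[current_token_start:]
--             yield next_domain_id
--             break
--
--         # If this ampersand is part of a pair (encoded), skip the first one
--         if encoded_domain_ids[next_ampersand_index:next_ampersand_index + 2] == '&&':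
--             next_domain_id += encoded_domain_ids[current_token_start:next_ampersand_index + 1]
--             current_token_start = next_ampersand_index + 2
--             continue
--
--         # Otherwise, it just gets to be its own token
--         else:
--             next_domain_id += encoded_domain_ids[current_token_start:next_ampersand_index]
--             yield next_domain_id
--             next_domain_id = ""
--             current_token_start = next_ampersand_index + 1
--
-- def _special_tokenize(
--         encoded_domain_ids: str,
--         strip: bool=True,
-- ) -> Set[str]:
--     split_domain_ids = tokenize_domain_ids(encoded_domain_ids)
--
--     if strip:
--         split_domain_ids = map(str.strip, split_domain_ids)
--
--     return set(d for d in split_domain_ids if d)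
-- ===== SOURCE B (Python) =====
-- def _special_tokenize(encoded_domain_ids, strip=True):
--     pieces = encoded_domain_ids.split('&&')
--     tokens = pieces[0].split('&')
--     for piece in pieces[1:]:
--         frag = piece.split('&')
--         tokens[-1] += '&' + frag[0]
--         tokens.extend(frag[1:])
--     if strip:
--         tokens = [t.strip() for t in tokens]
--     return set(t for t in tokens if t)
-- ===== Notes on version B (the rewrite author's own statement) =====
-- stated objective: simpler
-- what changed: Replaces the generator's index/find scanning loop with a direct split on '&&' followed by a merge pass that glues each piece's first '&'-fragment onto the previous token, then the same strip/filter/set tail.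
import Mathlib
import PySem

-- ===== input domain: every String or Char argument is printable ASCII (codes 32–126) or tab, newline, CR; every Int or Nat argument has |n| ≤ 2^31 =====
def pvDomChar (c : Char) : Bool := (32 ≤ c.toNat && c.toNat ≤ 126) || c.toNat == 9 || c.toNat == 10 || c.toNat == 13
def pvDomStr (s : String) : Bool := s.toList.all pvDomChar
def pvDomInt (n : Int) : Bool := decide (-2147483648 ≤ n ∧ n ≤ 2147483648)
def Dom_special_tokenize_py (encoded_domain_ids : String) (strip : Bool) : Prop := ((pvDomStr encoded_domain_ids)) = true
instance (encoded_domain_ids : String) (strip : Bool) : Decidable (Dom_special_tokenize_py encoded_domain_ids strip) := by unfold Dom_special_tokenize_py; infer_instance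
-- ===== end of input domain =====

-- B replaces A's generator with index/find scanning by a direct split on "&&" plus a
-- merge pass gluing fragments; objective: simpler. Same strip/filter/set tail.

-- ===== PORT A =====
-- Exact char-level transcription of the find/slice loop of tokenize_domain_ids:
-- state = (next_domain_id = acc, unscanned suffix). '&&' appends a literal '&' and skips
-- the pair; a lone '&' yields the accumulated token; end of string yields the rest.
def pvTokGen : List Char → List Char → List (List Char)
  | [], acc => [acc]
  | '&' :: '&' :: rest, acc => pvTokGen rest (acc ++ ['&'])
  | '&' :: rest, acc => acc :: pvTokGen rest []
  | c :: rest, acc => pvTokGen rest (acc ++ [c])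

def special_tokenize_py (encoded_domain_ids : String) (strip : Bool) : List String :=
  let toks := pvTokGen encoded_domain_ids.toList []
  let toks := if strip then toks.map PySem.Chars.strip else toks
  PySem.Set.ofList ((toks.filter (fun d => !d.isEmpty)).map String.ofList)

-- ===== PORT B =====
-- one merge step of Source B's loop: frag = piece.split('&'); tokens[-1] += '&' + frag[0]; tokens.extend(frag[1:])
def pvMergeStep (toks : List (List Char)) (piece : List Char) : List (List Char) :=
  match PySem.Chars.splitOn piece ['&'] with
  | [] => toks          -- unreachable: str.split never returns an empty list
  | f :: fs =>
    match toks.getLast? with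
    | some last => toks.dropLast ++ (last ++ '&' :: f) :: fs
    | none => toks      -- unreachable: tokens is never empty

def pvTokensB (cs : List Char) : List (List Char) :=
  match PySem.Chars.splitOn cs ['&', '&'] with
  | [] => []            -- unreachable: str.split never returns an empty list
  | p :: ps => ps.foldl pvMergeStep (PySem.Chars.splitOn p ['&'])

def special_tokenize_py_alt (encoded_domain_ids : String) (strip : Bool) : List String :=
  let toks := pvTokensB encoded_domain_ids.toList
  let toks := if strip then toks.map PySem.Chars.strip else toks
  PySem.Set.ofList ((toks.filter (fun d => !d.isEmpty)).map String.ofList)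

-- ===== PRECONDITION & SPEC =====
def Spec_special_tokenize_py (encoded_domain_ids : String) (strip : Bool) (out : List String) : Prop := out = special_tokenize_py_alt encoded_domain_ids strip
instance (encoded_domain_ids : String) (strip : Bool) (out : List String) : Decidable (Spec_special_tokenize_py encoded_domain_ids strip out) := by unfold Spec_special_tokenize_py; infer_instance

-- ===== CLAIM (what is proved, stated in full; the proofs are below) =====
def Claim_equal_special_tokenize_py : Prop := ∀ (encoded_domain_ids : String) (strip : Bool), Dom_special_tokenize_py encoded_domain_ids strip → Spec_special_tokenize_py encoded_domain_ids strip (special_tokenize_py encoded_domain_ids strip)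

-- ===== LEMMAS AND PROOFS =====

-- prepend x onto the first element (the "glue" shape of split results)
def pvConsHd (x : List Char) : List (List Char) → List (List Char)
  | [] => [x]
  | h :: t => (x ++ h) :: t

-- reference characterisation of PySem.Chars.splitOn (nonempty separator)
def pvSplitAux (sep : List Char) : List Char → List (List Char)
  | [] => [[]]
  | c :: rest =>
    if sep.isPrefixOf (c :: rest) && !sep.isEmpty then
      [] :: pvSplitAux sep ((c :: rest).drop sep.length)
    else pvConsHd [c] (pvSplitAux sep rest)
  termination_by l => l.length
  decreasing_by
  · rename_i h
    simp only [Bool.and_eq_true, List.isPrefixOf_iff_prefix] at h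
    have h1 := h.1.length_le
    have h2 : 0 < sep.length := List.length_pos_iff.mpr (by simpa using h.2)
    simp only [List.length_drop, List.length_cons] at *
    omega
  · simp

theorem pvSplitAux_ne_nil (sep l) : pvSplitAux sep l ≠ [] := by
  cases l with
  | nil => simp [pvSplitAux]
  | cons c rest =>
    rw [pvSplitAux]
    split
    · simp
    · cases h : pvSplitAux sep rest <;> simp [pvConsHd]

theorem pvConsHd_nil_of_ne {l : List (List Char)} (h : l ≠ []) : pvConsHd [] l = l := by
  cases l with
  | nil => exact absurd rfl h
  | cons a t => simp [pvConsHd]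

theorem pvConsHd_consHd (a b : List Char) (l : List (List Char)) :
    pvConsHd a (pvConsHd b l) = pvConsHd (a ++ b) l := by
  cases l <;> simp [pvConsHd]

theorem pvGo_eq (sep : List Char) (hsep : sep ≠ []) :
    ∀ (fuel : Nat) (l cur : List Char) (out : List (List Char)), l.length ≤ fuel →
      PySem.Chars.splitOn.go sep fuel l cur out = out.reverse ++ pvConsHd cur.reverse (pvSplitAux sep l) := by
  intro fuel
  induction fuel with
  | zero =>
    intro l cur out hl
    have : l = [] := List.length_eq_zero_iff.mp (Nat.le_zero.mp hl)
    subst this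
    simp [PySem.Chars.splitOn.go, pvSplitAux, pvConsHd]
  | succ fuel ih =>
    intro l cur out hl
    cases l with
    | nil => simp [PySem.Chars.splitOn.go, pvSplitAux, pvConsHd]
    | cons c rest =>
      rw [PySem.Chars.splitOn.go]
      have hsl : 0 < sep.length := List.length_pos_iff.mpr hsep
      by_cases hp : sep.isPrefixOf (c :: rest) = true
      · have hle : sep.length ≤ (c :: rest).length :=
          (List.isPrefixOf_iff_prefix.mp hp).length_le
        rw [if_pos hp, ih _ [] _ (by simp only [List.length_drop, List.length_cons] at *; omega)]
        rw [pvSplitAux, if_pos (by simp [hp, hsep]), List.reverse_nil,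
          pvConsHd_nil_of_ne (pvSplitAux_ne_nil sep _)]
        simp [pvConsHd]
      · rw [if_neg hp, ih rest (c :: cur) out (by simp at hl ⊢; omega)]
        rw [pvSplitAux, if_neg (by simp [hp])]
        rw [pvConsHd_consHd]
        simp

theorem pvSplitOn_eq (sep l : List Char) (hsep : sep ≠ []) :
    PySem.Chars.splitOn l sep = pvSplitAux sep l := by
  unfold PySem.Chars.splitOn
  rw [pvGo_eq sep hsep _ l [] [] (by omega)]
  simp [pvConsHd_nil_of_ne (pvSplitAux_ne_nil sep l)]

theorem pvMergeStep_cons (x : List Char) (t : List (List Char)) (p : List Char) (ht : t ≠ []) :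
    pvMergeStep (x :: t) p = x :: pvMergeStep t p := by
  unfold pvMergeStep
  cases h : PySem.Chars.splitOn p ['&'] with
  | nil => rfl
  | cons f fs =>
    cases t with
    | nil => exact absurd rfl ht
    | cons y t' =>
      cases hg : (y :: t').getLast? with
      | none => simp at hg
      | some last => simp [List.getLast?_cons_cons, hg]

theorem pvMergeStep_ne_nil (t : List (List Char)) (p : List Char) (ht : t ≠ []) :
    pvMergeStep t p ≠ [] := by
  unfold pvMergeStep
  cases h : PySem.Chars.splitOn p ['&'] with
  | nil => exact ht
  | cons f fs =>
    cases hg : t.getLast? with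
    | none => exact ht
    | some last => simp

theorem pvMergeStep_consHd (x : List Char) (l : List (List Char)) (p : List Char) (hl : l ≠ []) :
    pvMergeStep (pvConsHd x l) p = pvConsHd x (pvMergeStep l p) := by
  cases l with
  | nil => exact absurd rfl hl
  | cons h t =>
    cases t with
    | nil =>
      unfold pvMergeStep
      cases hs : PySem.Chars.splitOn p ['&'] with
      | nil => rfl
      | cons f fs => simp [pvConsHd, List.append_assoc]
    | cons y t' =>
      rw [show pvConsHd x (h :: y :: t') = (x ++ h) :: y :: t' from rfl,
        pvMergeStep_cons (x ++ h) (y :: t') p (by simp),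
        pvMergeStep_cons h (y :: t') p (by simp)]
      simp [pvConsHd]

theorem pvFoldl_ne_nil (ps : List (List Char)) (l : List (List Char)) (hl : l ≠ []) :
    ps.foldl pvMergeStep l ≠ [] := by
  induction ps generalizing l with
  | nil => exact hl
  | cons p ps ih => exact ih _ (pvMergeStep_ne_nil l p hl)

theorem pvFoldl_cons (ps : List (List Char)) (x : List Char) (t : List (List Char)) (ht : t ≠ []) :
    ps.foldl pvMergeStep (x :: t) = x :: ps.foldl pvMergeStep t := by
  induction ps generalizing x t with
  | nil => rfl
  | cons p ps ih =>
    simp only [List.foldl_cons]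
    rw [pvMergeStep_cons x t p ht, ih x _ (pvMergeStep_ne_nil t p ht)]

theorem pvFoldl_consHd (ps : List (List Char)) (x : List Char) (l : List (List Char)) (hl : l ≠ []) :
    ps.foldl pvMergeStep (pvConsHd x l) = pvConsHd x (ps.foldl pvMergeStep l) := by
  induction ps generalizing x l with
  | nil => rfl
  | cons p ps ih =>
    simp only [List.foldl_cons]
    rw [pvMergeStep_consHd x l p hl, ih x _ (pvMergeStep_ne_nil l p hl)]

-- pvTokensB through the splitAux characterisation
theorem pvTokensB_eq (cs : List Char) :
    pvTokensB cs = match pvSplitAux ['&', '&'] cs with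
      | [] => []
      | p :: ps => ps.foldl pvMergeStep (pvSplitAux ['&'] p) := by
  unfold pvTokensB
  rw [pvSplitOn_eq _ _ (by simp)]
  cases h : pvSplitAux ['&', '&'] cs with
  | nil => rfl
  | cons p ps =>
    simp only []
    rw [pvSplitOn_eq ['&'] p (by simp)]

theorem pvSplitAux2_pair (rest : List Char) :
    pvSplitAux ['&', '&'] ('&' :: '&' :: rest) = [] :: pvSplitAux ['&', '&'] rest := by
  rw [pvSplitAux]
  simp [List.isPrefixOf]

theorem pvSplitAux2_lone (rest : List Char) (h : ∀ r, rest ≠ '&' :: r) :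
    pvSplitAux ['&', '&'] ('&' :: rest) = pvConsHd ['&'] (pvSplitAux ['&', '&'] rest) := by
  rw [pvSplitAux]
  rw [if_neg]
  cases rest with
  | nil => simp [List.isPrefixOf]
  | cons c r =>
    have hc : c ≠ '&' := fun hc => h r (by rw [hc])
    simp [List.isPrefixOf, Ne.symm hc]

theorem pvSplitAux2_other (c : Char) (rest : List Char) (h : c ≠ '&') :
    pvSplitAux ['&', '&'] (c :: rest) = pvConsHd [c] (pvSplitAux ['&', '&'] rest) := by
  rw [pvSplitAux]
  rw [if_neg (by simp [List.isPrefixOf, Ne.symm h])]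

theorem pvSplitAux1_amp (p : List Char) :
    pvSplitAux ['&'] ('&' :: p) = [] :: pvSplitAux ['&'] p := by
  rw [pvSplitAux]
  simp [List.isPrefixOf]

theorem pvSplitAux1_other (c : Char) (p : List Char) (h : c ≠ '&') :
    pvSplitAux ['&'] (c :: p) = pvConsHd [c] (pvSplitAux ['&'] p) := by
  rw [pvSplitAux]
  rw [if_neg (by simp [List.isPrefixOf, Ne.symm h])]

theorem pvMergeStep_single (x p : List Char) :
    pvMergeStep [x] p = pvConsHd (x ++ ['&']) (pvSplitAux ['&'] p) := by
  unfold pvMergeStep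
  rw [pvSplitOn_eq ['&'] p (by simp)]
  cases hs : pvSplitAux ['&'] p with
  | nil => exact absurd hs (pvSplitAux_ne_nil _ _)
  | cons f fs => simp [pvConsHd]

theorem pvTokGen_lone (rest acc : List Char) (h : ∀ r, rest ≠ '&' :: r) :
    pvTokGen ('&' :: rest) acc = acc :: pvTokGen rest [] := by
  cases rest with
  | nil => rfl
  | cons c r =>
    have hc : c ≠ '&' := fun hc => h r (by rw [hc])
    simp only [pvTokGen]

theorem pvTokGen_other (c : Char) (rest acc : List Char) (h : c ≠ '&') :
    pvTokGen (c :: rest) acc = pvTokGen rest (acc ++ [c]) := by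
  rw [pvTokGen]
  case x_2 => exact fun r1 hc _ => h hc
  case x_3 => exact fun hc => h hc

theorem pvSplitAux2_cons (rest : List Char) :
    ∃ p ps, pvSplitAux ['&', '&'] rest = p :: ps := by
  cases h : pvSplitAux ['&', '&'] rest with
  | nil => exact absurd h (pvSplitAux_ne_nil _ _)
  | cons a b => exact ⟨a, b, rfl⟩

-- the token-sequence equivalence: A's generator = B's split-and-merge, head-glued onto acc
theorem pvMain (cs acc : List Char) : pvTokGen cs acc = pvConsHd acc (pvTokensB cs) := by
  induction cs, acc using pvTokGen.induct with
  | case1 acc =>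
    rw [pvTokensB_eq]
    simp [pvSplitAux, pvTokGen, pvConsHd]
  | case2 rest acc ih =>
    obtain ⟨p', ps', h2⟩ := pvSplitAux2_cons rest
    have hb : pvTokensB rest = ps'.foldl pvMergeStep (pvSplitAux ['&'] p') := by
      rw [pvTokensB_eq, h2]
    have hbig : pvTokensB ('&' :: '&' :: rest) =
        List.foldl pvMergeStep (pvSplitAux ['&'] []) (p' :: ps') := by
      rw [pvTokensB_eq, pvSplitAux2_pair, h2]
    rw [show pvTokGen ('&' :: '&' :: rest) acc = pvTokGen rest (acc ++ ['&']) from rfl, ih, hb,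
      hbig, show pvSplitAux ['&'] [] = [[]] from by rw [pvSplitAux]]
    simp only [List.foldl_cons]
    rw [pvMergeStep_single [] p', List.nil_append,
      pvFoldl_consHd ps' ['&'] _ (pvSplitAux_ne_nil _ _), pvConsHd_consHd]
  | case3 rest acc hne ih =>
    obtain ⟨p', ps', h2⟩ := pvSplitAux2_cons rest
    have hb : pvTokensB rest = ps'.foldl pvMergeStep (pvSplitAux ['&'] p') := by
      rw [pvTokensB_eq, h2]
    have hbne : pvTokensB rest ≠ [] := by
      rw [hb]; exact pvFoldl_ne_nil _ _ (pvSplitAux_ne_nil _ _)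
    have hbig : pvTokensB ('&' :: rest) =
        List.foldl pvMergeStep (pvSplitAux ['&'] ('&' :: p')) ps' := by
      rw [pvTokensB_eq, pvSplitAux2_lone rest (fun r hr => hne r hr), h2]
      simp [pvConsHd]
    rw [pvTokGen_lone rest acc (fun r hr => hne r hr), ih, pvConsHd_nil_of_ne hbne, hbig,
      pvSplitAux1_amp, pvFoldl_cons ps' [] _ (pvSplitAux_ne_nil _ _), ← hb]
    simp [pvConsHd]
  | case4 c rest acc h1 h2c ih =>
    have hc : c ≠ '&' := fun hcc => h2c hcc
    obtain ⟨p', ps', h2⟩ := pvSplitAux2_cons rest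
    have hb : pvTokensB rest = ps'.foldl pvMergeStep (pvSplitAux ['&'] p') := by
      rw [pvTokensB_eq, h2]
    have hbig : pvTokensB (c :: rest) =
        List.foldl pvMergeStep (pvSplitAux ['&'] (c :: p')) ps' := by
      rw [pvTokensB_eq, pvSplitAux2_other c rest hc, h2]
      simp [pvConsHd]
    rw [pvTokGen_other c rest acc hc, ih, hbig, pvSplitAux1_other c p' hc,
      pvFoldl_consHd ps' [c] _ (pvSplitAux_ne_nil _ _), ← hb, pvConsHd_consHd]

theorem pvTok_eq (cs : List Char) : pvTokGen cs [] = pvTokensB cs := by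
  rw [pvMain cs []]
  have h : pvTokensB cs ≠ [] := by
    rw [pvTokensB_eq]
    cases h2 : pvSplitAux ['&', '&'] cs with
    | nil => exact absurd h2 (pvSplitAux_ne_nil _ _)
    | cons p ps => exact pvFoldl_ne_nil ps _ (pvSplitAux_ne_nil _ _)
  exact pvConsHd_nil_of_ne h

-- ===== VERDICT (by name: the statement is the Claim_ definition above) =====
theorem special_tokenize_py_spec : Claim_equal_special_tokenize_py := by
  intro s strip _
  unfold Spec_special_tokenize_py special_tokenize_py special_tokenize_py_alt
  rw [pvTok_eq]
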